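-- pv_equiv track=rewrite | github.com/RajaYehia/QuantumCity | QuantumCity.py | Sifting4
-- ===== SOURCE A (Python) =====
-- def Sifting4(L1,L2,L3,L4):
--     #Function to get the number of matching received qubit for 4 qubit
--     Lres = []
--     for i in range(len(L1)):
--         ta, ma = L1[i]
--         for j in range(len(L2)):
--             tb, mb = L2[j]
--             if ta == tb:
--                 for k in range(len(L3)):
--                     tc, mc = L3[k]
--                     if tb == tc:
--                         for l in range(len(L4)):
--                             td, md = L4[l]
--                             if td == tc:
--                                 Lres.append((ma,mb,mc,md))
--     return Lres
-- ===== SOURCE B (Python) =====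
-- def Sifting4(L1, L2, L3, L4):
--     # Group each of L2, L3, L4 by timestamp once, then emit ordered products.
--     def group(L):
--         g = {}
--         for t, m in L:
--             g[t] = g.get(t, []) + [m]
--         return g
--     g2, g3, g4 = group(L2), group(L3), group(L4)
--     return [(ma, mb, mc, md)
--             for ta, ma in L1
--             for mb in g2.get(ta, [])
--             for mc in g3.get(ta, [])
--             for md in g4.get(ta, [])]
-- ===== Notes on version B (the rewrite author's own statement) =====
-- stated objective: faster
-- what changed: Replaced the quadruple nested scan with hash-grouping of L2/L3/L4 by timestamp once, then a single pass over L1 emitting products of the matching groups.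
import Mathlib
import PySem

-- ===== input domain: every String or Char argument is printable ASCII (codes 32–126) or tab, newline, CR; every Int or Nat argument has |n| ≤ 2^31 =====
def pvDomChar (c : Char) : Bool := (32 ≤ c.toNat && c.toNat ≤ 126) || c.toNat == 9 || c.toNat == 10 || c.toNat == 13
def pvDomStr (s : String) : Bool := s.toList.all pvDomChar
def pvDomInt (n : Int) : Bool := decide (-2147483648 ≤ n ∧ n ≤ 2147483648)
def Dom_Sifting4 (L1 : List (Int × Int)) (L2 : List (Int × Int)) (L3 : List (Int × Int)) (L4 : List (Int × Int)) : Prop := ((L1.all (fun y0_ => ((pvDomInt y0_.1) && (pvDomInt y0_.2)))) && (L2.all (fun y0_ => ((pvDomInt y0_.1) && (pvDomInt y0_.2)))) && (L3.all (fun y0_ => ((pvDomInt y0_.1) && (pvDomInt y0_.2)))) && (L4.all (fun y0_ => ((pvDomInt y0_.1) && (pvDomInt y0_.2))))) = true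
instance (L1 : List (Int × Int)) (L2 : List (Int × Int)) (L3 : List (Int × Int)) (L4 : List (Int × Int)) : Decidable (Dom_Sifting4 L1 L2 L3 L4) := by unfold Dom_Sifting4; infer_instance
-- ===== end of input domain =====

-- B replaces A's quadruple nested scan by hash-grouping L2/L3/L4 by timestamp once,
-- then a single pass over L1 emitting products of the matching groups (objective: faster).

-- ===== PORT A =====
def Sifting4 (L1 : List (Int × Int)) (L2 : List (Int × Int)) (L3 : List (Int × Int)) (L4 : List (Int × Int)) : List (Int × Int × Int × Int) :=
  (PySem.List.pyRange 0 (PySem.List.len L1) 1).foldl (fun Lres i =>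
    (fun (acc : List (Int × Int × Int × Int)) (p : Int × Int) =>
      (PySem.List.pyRange 0 (PySem.List.len L2) 1).foldl (fun acc2 j =>
        (fun (accB : List (Int × Int × Int × Int)) (q : Int × Int) =>
          if p.1 == q.1 then
            (PySem.List.pyRange 0 (PySem.List.len L3) 1).foldl (fun acc3 k =>
              (fun (accC : List (Int × Int × Int × Int)) (r : Int × Int) =>
                if q.1 == r.1 then
                  (PySem.List.pyRange 0 (PySem.List.len L4) 1).foldl (fun acc4 l =>
                    (fun (accD : List (Int × Int × Int × Int)) (s : Int × Int) =>
                      if s.1 == r.1 then accD ++ [(p.2, q.2, r.2, s.2)] else accD)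
                    acc4 (PySem.List.pyGetD L4 l (0, 0))) accC
                else accC)
              acc3 (PySem.List.pyGetD L3 k (0, 0))) accB
          else accB)
        acc2 (PySem.List.pyGetD L2 j (0, 0))) acc)
    Lres (PySem.List.pyGetD L1 i (0, 0))) []

-- ===== PORT B =====
-- helper of B: group a list of (timestamp, measurement) pairs by timestamp
def pvGroup (L : List (Int × Int)) : PySem.Dict Int (List Int) :=
  L.foldl (fun g p => g.insert p.1 (g.getD p.1 [] ++ [p.2])) PySem.Dict.empty

def Sifting4_alt (L1 : List (Int × Int)) (L2 : List (Int × Int)) (L3 : List (Int × Int)) (L4 : List (Int × Int)) : List (Int × Int × Int × Int) :=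
  let g2 := pvGroup L2
  let g3 := pvGroup L3
  let g4 := pvGroup L4
  L1.flatMap (fun p =>
    (g2.getD p.1 []).flatMap (fun mb =>
      (g3.getD p.1 []).flatMap (fun mc =>
        (g4.getD p.1 []).map (fun md => (p.2, mb, mc, md)))))

-- ===== PRECONDITION & SPEC =====
def Spec_Sifting4 (L1 : List (Int × Int)) (L2 : List (Int × Int)) (L3 : List (Int × Int)) (L4 : List (Int × Int)) (out : List (Int × Int × Int × Int)) : Prop := out = Sifting4_alt L1 L2 L3 L4
instance (L1 : List (Int × Int)) (L2 : List (Int × Int)) (L3 : List (Int × Int)) (L4 : List (Int × Int)) (out : List (Int × Int × Int × Int)) : Decidable (Spec_Sifting4 L1 L2 L3 L4 out) := by unfold Spec_Sifting4; infer_instance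

-- ===== CLAIM (what is proved, stated in full; the proofs are below) =====
def Claim_equal_Sifting4 : Prop := ∀ (L1 : List (Int × Int)) (L2 : List (Int × Int)) (L3 : List (Int × Int)) (L4 : List (Int × Int)), Dom_Sifting4 L1 L2 L3 L4 → Spec_Sifting4 L1 L2 L3 L4 (Sifting4 L1 L2 L3 L4)

-- ===== LEMMAS AND PROOFS =====

-- the four loop bodies of A, named so the pyRange bridge lemmas can be applied first-order
def pvBody4 (mavals : Int × Int × Int) (tc : Int) : List (Int × Int × Int × Int) → (Int × Int) → List (Int × Int × Int × Int) :=
  fun acc4 s => if s.1 == tc then acc4 ++ [(mavals.1, mavals.2.1, mavals.2.2, s.2)] else acc4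

def pvBody3 (ma mb tb : Int) (L4 : List (Int × Int)) : List (Int × Int × Int × Int) → (Int × Int) → List (Int × Int × Int × Int) :=
  fun acc3 r => if tb == r.1 then
    (PySem.List.pyRange 0 (PySem.List.len L4) 1).foldl (fun acc4 l =>
      pvBody4 (ma, mb, r.2) r.1 acc4 (PySem.List.pyGetD L4 l (0, 0))) acc3
  else acc3

def pvBody2 (ma ta : Int) (L3 L4 : List (Int × Int)) : List (Int × Int × Int × Int) → (Int × Int) → List (Int × Int × Int × Int) :=
  fun acc2 q => if ta == q.1 then
    (PySem.List.pyRange 0 (PySem.List.len L3) 1).foldl (fun acc3 k =>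
      pvBody3 ma q.2 q.1 L4 acc3 (PySem.List.pyGetD L3 k (0, 0))) acc2
  else acc2

def pvBody1 (L2 L3 L4 : List (Int × Int)) : List (Int × Int × Int × Int) → (Int × Int) → List (Int × Int × Int × Int) :=
  fun acc p =>
    (PySem.List.pyRange 0 (PySem.List.len L2) 1).foldl (fun acc2 j =>
      pvBody2 p.2 p.1 L3 L4 acc2 (PySem.List.pyGetD L2 j (0, 0))) acc

theorem pvChar4 (ma mb mc tc : Int) (L4 : List (Int × Int)) (acc : List (Int × Int × Int × Int)) :
    (PySem.List.pyRange 0 (PySem.List.len L4) 1).foldl (fun acc4 l =>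
        pvBody4 (ma, mb, mc) tc acc4 (PySem.List.pyGetD L4 l (0, 0))) acc
      = acc ++ (L4.filter (fun s => s.1 == tc)).map (fun s => (ma, mb, mc, s.2)) := by
  rw [PySem.List.foldl_pyRange_zero_pyGetD L4 (0, 0) (pvBody4 (ma, mb, mc) tc) acc]
  exact PySem.List.foldl_append_if _ _ _ _

theorem pvChar3 (ma mb tb : Int) (L3 L4 : List (Int × Int)) (acc : List (Int × Int × Int × Int)) :
    (PySem.List.pyRange 0 (PySem.List.len L3) 1).foldl (fun acc3 k =>
        pvBody3 ma mb tb L4 acc3 (PySem.List.pyGetD L3 k (0, 0))) acc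
      = acc ++ (L3.filter (fun r => tb == r.1)).flatMap (fun r =>
          (L4.filter (fun s => s.1 == r.1)).map (fun s => (ma, mb, r.2, s.2))) := by
  rw [PySem.List.foldl_pyRange_zero_pyGetD L3 (0, 0) (pvBody3 ma mb tb L4) acc]
  unfold pvBody3
  simp only [pvChar4]
  rw [PySem.List.foldl_if_eq_foldl_filter]
  exact PySem.List.foldl_append_eq_flatMap _ _ _

theorem pvChar2 (ma ta : Int) (L2 L3 L4 : List (Int × Int)) (acc : List (Int × Int × Int × Int)) :
    (PySem.List.pyRange 0 (PySem.List.len L2) 1).foldl (fun acc2 j =>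
        pvBody2 ma ta L3 L4 acc2 (PySem.List.pyGetD L2 j (0, 0))) acc
      = acc ++ (L2.filter (fun q => ta == q.1)).flatMap (fun q =>
          (L3.filter (fun r => q.1 == r.1)).flatMap (fun r =>
            (L4.filter (fun s => s.1 == r.1)).map (fun s => (ma, q.2, r.2, s.2)))) := by
  rw [PySem.List.foldl_pyRange_zero_pyGetD L2 (0, 0) (pvBody2 ma ta L3 L4) acc]
  unfold pvBody2
  simp only [pvChar3]
  rw [PySem.List.foldl_if_eq_foldl_filter]
  exact PySem.List.foldl_append_eq_flatMap _ _ _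

theorem pvCharA (L1 L2 L3 L4 : List (Int × Int)) :
    Sifting4 L1 L2 L3 L4
      = L1.flatMap (fun p =>
          (L2.filter (fun q => p.1 == q.1)).flatMap (fun q =>
            (L3.filter (fun r => q.1 == r.1)).flatMap (fun r =>
              (L4.filter (fun s => s.1 == r.1)).map (fun s => (p.2, q.2, r.2, s.2))))) := by
  have h0 : Sifting4 L1 L2 L3 L4
      = (PySem.List.pyRange 0 (PySem.List.len L1) 1).foldl (fun acc i =>
          pvBody1 L2 L3 L4 acc (PySem.List.pyGetD L1 i (0, 0))) [] := rfl
  rw [h0, PySem.List.foldl_pyRange_zero_pyGetD L1 (0, 0) (pvBody1 L2 L3 L4) []]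
  unfold pvBody1
  simp only [pvChar2]
  simp only [PySem.List.foldl_append_eq_flatMap]
  simp

theorem int_beq_comm (a b : Int) : (a == b) = (b == a) := by
  by_cases h : a = b
  · simp [h]
  · have h' : ¬ b = a := fun h2 => h h2.symm
    simp [h, h']

-- what B's grouping dictionary holds at each key
theorem pvGroup_fold_getD (L : List (Int × Int)) (g : PySem.Dict Int (List Int)) (t : Int) :
    (L.foldl (fun g p => g.insert p.1 (g.getD p.1 [] ++ [p.2])) g).getD t []
      = g.getD t [] ++ (L.filter (fun p => p.1 == t)).map Prod.snd := by
  induction L generalizing g with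
  | nil => simp
  | cons a L ih =>
    simp only [List.foldl_cons, List.filter_cons, ih]
    by_cases h : a.1 = t
    · subst h
      rw [PySem.Dict.getD_insert_self]
      simp
    · rw [PySem.Dict.getD_insert_of_ne _ _ _ (Ne.symm h)]
      simp [h]

theorem pvGroup_getD (L : List (Int × Int)) (t : Int) :
    (pvGroup L).getD t [] = (L.filter (fun p => p.1 == t)).map Prod.snd := by
  unfold pvGroup
  rw [pvGroup_fold_getD]
  simp [PySem.Dict.empty, PySem.Dict.getD, PySem.Dict.get?]

-- ===== VERDICT (by name: the statement is the Claim_ definition above) =====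
theorem Sifting4_spec : Claim_equal_Sifting4 := by
  intro L1 L2 L3 L4 _
  unfold Spec_Sifting4 Sifting4_alt
  rw [pvCharA]
  simp only [pvGroup_getD, List.flatMap_map, List.map_map]
  apply List.flatMap_congr
  intro p _
  rw [show (L2.filter fun q => q.1 == p.1) = (L2.filter fun q => p.1 == q.1) from by
    simp only [int_beq_comm]]
  apply List.flatMap_congr
  intro q hq
  have hpq : p.1 = q.1 := eq_of_beq (List.mem_filter.mp hq).2
  rw [show (L3.filter fun r => r.1 == p.1) = (L3.filter fun r => q.1 == r.1) from by
    rw [hpq]; simp only [int_beq_comm]]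
  apply List.flatMap_congr
  intro r hr
  have hqr : q.1 = r.1 := eq_of_beq (List.mem_filter.mp hr).2
  rw [show (L4.filter fun s => s.1 == p.1) = (L4.filter fun s => s.1 == r.1) from by
    rw [hpq, hqr]]
  simp [Function.comp]
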